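-- pv_equiv track=rewrite | github.com/triglan/Y24_S1 | Script/_Homework/work6/프로그래머스_02_신고결과받기.py | solution
-- ===== SOURCE A (Python) =====
-- import collections
--
-- def solution(id_list, report, k):
--     answer = []
--     mails = collections.defaultdict(int)
--     black_list = collections.defaultdict(set)
--
--     for r in report:
--         mem1, mem2 = r.split()
--         black_list[mem2].add(mem1)
--
--     for b in black_list.keys():
--         if len(black_list[b]) >= k:
--             for mem in black_list[b]:
--                 mails[mem] += 1
--
--     return [mails[i] for i in id_list]
-- ===== SOURCE B (Python) =====
-- def solution(id_list, report, k):
--     pairs = sorted({tuple(r.split()) for r in report}, key=lambda p: p[1])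
--     good = []
--     rest = pairs
--     while rest:
--         b = rest[0][1]
--         group = []
--         while rest and rest[0][1] == b:
--             group.append(rest[0][0])
--             rest = rest[1:]
--         if len(group) >= k:
--             good += group
--     return [good.count(x) for x in id_list]
-- ===== Notes on version B (the rewrite author's own statement) =====
-- stated objective: alternative
-- what changed: B replaces A's hash-based counting (dict mapping each reported user to the set of their reporters, then a nested crediting loop) by sort-then-scan: it sorts the deduplicated (reporter, reported) pairs by reported user, sweeps the sorted list once with a two-level while loop collecting each contiguous group, credits a whole group's reporters when the group has >= k pairs, and answers by counting occurrences per id.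
import Mathlib
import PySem

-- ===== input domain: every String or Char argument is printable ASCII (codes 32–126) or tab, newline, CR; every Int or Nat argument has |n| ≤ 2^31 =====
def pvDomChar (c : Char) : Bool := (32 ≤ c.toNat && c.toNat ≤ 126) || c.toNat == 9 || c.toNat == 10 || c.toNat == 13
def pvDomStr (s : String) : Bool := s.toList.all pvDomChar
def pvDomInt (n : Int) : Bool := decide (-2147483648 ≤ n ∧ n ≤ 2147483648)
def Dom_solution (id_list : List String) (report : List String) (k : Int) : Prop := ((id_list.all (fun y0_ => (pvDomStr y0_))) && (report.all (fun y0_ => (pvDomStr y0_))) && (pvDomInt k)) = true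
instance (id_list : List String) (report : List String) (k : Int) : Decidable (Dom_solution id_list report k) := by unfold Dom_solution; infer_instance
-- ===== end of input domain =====

-- B sorts the deduplicated (reporter, reported) pairs by reported user and sweeps the sorted
-- list group by group (crediting a whole group when it has ≥ k members), instead of A's
-- dict-of-sets counting (objective: alternative, sort-then-scan instead of hashing).

-- ===== PORT A =====
def solution (id_list : List String) (report : List String) (k : Int) : List Int :=
  let black_list : PySem.Dict String (PySem.Set String) :=
    report.foldl (fun d r =>
      match PySem.Str.split₀ r with
      | [mem1, mem2] => d.insert mem2 ((d.getD mem2 PySem.Set.empty).add mem1)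
      | _ => d) PySem.Dict.empty
  let mails : PySem.Dict String Int :=
    black_list.keys.foldl (fun m b =>
      if k ≤ (black_list.getD b PySem.Set.empty).len then
        (black_list.getD b PySem.Set.empty).foldl (fun m mem => m.insert mem (m.getD mem 0 + 1)) m
      else m) PySem.Dict.empty
  id_list.map (fun i => mails.getD i 0)

-- ===== PORT B =====
-- Source B's set comprehension {tuple(r.split()) for r in report}: one step adds the split pair
def pvAddPair (s : PySem.Set (String × String)) (r : String) : PySem.Set (String × String) :=
  let ts := PySem.Str.split₀ r
  if hts : ts.length = 2 then s.add (ts[0]'(by omega), ts[1]'(by omega)) else s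

-- the two nested while loops of Source B: the inner loop takes the leading run of pairs with the
-- same reported user (takeWhile/dropWhile), the outer loop recurses on what is left
def pvGroupScan (k : Int) : List (String × String) → List String
  | [] => []
  | p :: t =>
    let grp := ((p :: t).takeWhile (fun q => q.2 == p.2)).map Prod.fst
    let rest := (p :: t).dropWhile (fun q => q.2 == p.2)
    (if k ≤ (grp.length : Int) then grp else []) ++ pvGroupScan k rest
  termination_by l => l.length
  decreasing_by
    simp only [List.dropWhile]
    have : (t.dropWhile (fun q => q.2 == p.2)).length ≤ t.length := (List.dropWhile_sublist _).length_le
    simp only [beq_self_eq_true]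
    simpa using Nat.lt_succ_of_le this

def solution_alt (id_list : List String) (report : List String) (k : Int) : List Int :=
  let pairs : List (String × String) :=
    PySem.List.sorted (report.foldl pvAddPair PySem.Set.empty) (fun p => p.2) false
  let good : List String := pvGroupScan k pairs
  id_list.map (fun i => (good.count i : Int))

-- ===== PRECONDITION & SPEC =====
-- Pre_ excludes exactly the reports on which Python A raises ValueError: a line of
-- 'report' that does not split into exactly two whitespace-separated tokens makes
-- 'mem1, mem2 = r.split()' fail to unpack.
def Pre_solution (id_list : List String) (report : List String) (k : Int) : Prop :=
  (report.all (fun r => (PySem.Str.split₀ r).length == 2)) = true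
instance (id_list : List String) (report : List String) (k : Int) : Decidable (Pre_solution id_list report k) := by unfold Pre_solution; infer_instance
def pvWitness_solution : List String × List String × Int := (["muzi", "frodo", "apeach"], ["muzi frodo", "apeach muzi", "muzi frodo"], 1)

def Spec_solution (id_list : List String) (report : List String) (k : Int) (out : List Int) : Prop := out = solution_alt id_list report k
instance (id_list : List String) (report : List String) (k : Int) (out : List Int) : Decidable (Spec_solution id_list report k out) := by unfold Spec_solution; infer_instance

-- ===== CLAIM (what is proved, stated in full; the proofs are below) =====
def Claim_equal_solution : Prop := ∀ (id_list : List String) (report : List String) (k : Int), Dom_solution id_list report k → Pre_solution id_list report k → Spec_solution id_list report k (solution id_list report k)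

-- ===== LEMMAS AND PROOFS =====

-- the deduplicated pair set both sides start from
def pvPairs (report : List String) : PySem.Set (String × String) :=
  report.foldl pvAddPair PySem.Set.empty

-- A's first fold over report, building the dict of reporter sets.
def pvBL (report : List String) : PySem.Dict String (PySem.Set String) :=
  report.foldl (fun d r =>
    match PySem.Str.split₀ r with
    | [mem1, mem2] => d.insert mem2 ((d.getD mem2 PySem.Set.empty).add mem1)
    | _ => d) PySem.Dict.empty

-- the invariant tying A's dict-of-sets to the pair set
def pvInv (d : PySem.Dict String (PySem.Set String)) (s : PySem.Set (String × String)) : Prop :=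
  s.Nodup ∧
  d.keys = PySem.Set.ofList (s.map Prod.snd) ∧
  ∀ b, d.getD b PySem.Set.empty = (s.filter (fun p => p.2 == b)).map Prod.fst

lemma pvInv_step (d : PySem.Dict String (PySem.Set String)) (s : PySem.Set (String × String))
    (h : pvInv d s) (m1 m2 : String) :
    pvInv (d.insert m2 ((d.getD m2 PySem.Set.empty).add m1)) (s.add (m1, m2)) := by
  obtain ⟨hnd, hk, hg⟩ := h
  have hmem : m1 ∈ d.getD m2 PySem.Set.empty ↔ (m1, m2) ∈ s := by
    rw [hg]
    simp only [List.mem_map, List.mem_filter]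
    constructor
    · rintro ⟨⟨a, b⟩, ⟨hp, hb⟩, hf⟩
      simp only [beq_iff_eq] at hb
      simp only at hf
      subst hb; subst hf; exact hp
    · intro hp; exact ⟨(m1, m2), ⟨hp, by simp⟩, rfl⟩
  have hkeys_mem : d.contains m2 = decide (m2 ∈ s.map Prod.snd) := by
    rw [PySem.Dict.contains_eq_decide_mem_keys, hk]
    simp [PySem.Set.mem_ofList]
  by_cases hps : (m1, m2) ∈ s
  · have hadd : s.add (m1, m2) = s := PySem.Set.add_of_mem hps
    have hset : (d.getD m2 PySem.Set.empty).add m1 = d.getD m2 PySem.Set.empty :=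
      PySem.Set.add_of_mem (hmem.mpr hps)
    have hcont : d.contains m2 = true := by
      rw [hkeys_mem, decide_eq_true_iff]
      exact List.mem_map.mpr ⟨(m1, m2), hps, rfl⟩
    refine ⟨by rw [hadd]; exact hnd, ?_, ?_⟩
    · rw [hadd, PySem.Dict.keys_insert_of_contains d _ hcont, hk]
    · intro b
      rw [hadd, hset, PySem.Dict.getD_insert]
      split_ifs with hb
      · subst hb; exact hg _
      · exact hg b
  · have hadd : s.add (m1, m2) = s ++ [(m1, m2)] := PySem.Set.add_of_not_mem hps
    refine ⟨?_, ?_, ?_⟩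
    · rw [hadd]
      refine List.Nodup.append hnd (List.nodup_singleton _) ?_
      intro p hp hq
      rw [List.mem_singleton] at hq
      exact hps (hq ▸ hp)
    · rw [hadd]
      simp only [List.map_append, List.map_cons, List.map_nil]
      rw [PySem.Set.ofList_eq_foldl, List.foldl_append, ← PySem.Set.ofList_eq_foldl]
      simp only [List.foldl_cons, List.foldl_nil]
      by_cases hm2 : m2 ∈ s.map Prod.snd
      · rw [PySem.Dict.keys_insert_of_contains d _
            (by rw [hkeys_mem, decide_eq_true_iff]; exact hm2), hk,
          PySem.Set.add_of_mem (by rw [PySem.Set.mem_ofList]; exact hm2)]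
      · rw [PySem.Dict.keys_insert_of_not_contains d _
            (by rw [hkeys_mem, decide_eq_false_iff_not]; exact hm2), hk,
          PySem.Set.add_of_not_mem (by rw [PySem.Set.mem_ofList]; exact hm2)]
    · intro b
      rw [hadd, PySem.Dict.getD_insert, List.filter_append, List.map_append]
      split_ifs with hb
      · subst hb
        rw [PySem.Set.add_of_not_mem (fun hm => hps (hmem.mp hm)), hg]
        simp
      · rw [hg b]
        have hbeq : (((m1, m2) : String × String).2 == b) = false := by
          simp only [beq_eq_false_iff_ne, ne_eq]
          exact fun h => hb h.symm
        simp [List.filter_cons, hbeq]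

lemma pvInv_build (report : List String) :
    ∀ (d : PySem.Dict String (PySem.Set String)) (s : PySem.Set (String × String)),
      pvInv d s → pvInv (report.foldl (fun d r =>
        match PySem.Str.split₀ r with
        | [mem1, mem2] => d.insert mem2 ((d.getD mem2 PySem.Set.empty).add mem1)
        | _ => d) d)
        (report.foldl pvAddPair s) := by
  induction report with
  | nil => intro d s h; exact h
  | cons r rs ih =>
    intro d s h
    simp only [List.foldl_cons]
    apply ih
    cases hsp : PySem.Str.split₀ r with
    | nil => simpa [pvAddPair, hsp] using h
    | cons a t =>
      cases t with
      | nil => simpa [pvAddPair, hsp] using h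
      | cons b u =>
        cases u with
        | nil => simpa [pvAddPair, hsp] using pvInv_step d s h a b
        | cons c v => simpa [pvAddPair, hsp] using h

lemma pvInv_pv (report : List String) : pvInv (pvBL report) (pvPairs report) := by
  apply pvInv_build
  exact ⟨List.nodup_nil, rfl, fun b => rfl⟩

-- value of A's nested crediting fold
lemma pvGetD_nested_fold (F : String → PySem.Set String) (P : String → Prop) [DecidablePred P] :
    ∀ (bs : List String) (M : PySem.Dict String Int) (m : String),
      (bs.foldl (fun M b =>
          if P b then (F b).foldl (fun M x => M.insert x (M.getD x 0 + 1)) M else M) M).getD m 0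
        = M.getD m 0 + ((bs.filter (fun b => decide (P b))).map (fun b => ((F b).count m : Int))).sum := by
  intro bs
  induction bs with
  | nil => intro M m; simp
  | cons b t ih =>
    intro M m
    simp only [List.foldl_cons, List.filter_cons]
    by_cases hP : P b
    · rw [if_pos hP, ih, PySem.Dict.getD_foldl_insert_add_one]
      simp only [hP, decide_true, if_pos, List.map_cons, List.sum_cons]
      ring
    · have hp' : (decide (P b)) = false := by simp [hP]
      rw [if_neg hP, ih]
      simp [hp']

-- a 0/x indicator summed over a duplicate-free list hits at most once
lemma pvSum_single (bs : List String) (hnd : bs.Nodup) (c : String) (x : Int) :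
    ((bs.map (fun b => if c = b then x else 0)).sum) = if c ∈ bs then x else 0 := by
  induction bs with
  | nil => simp
  | cons b t ih =>
    simp only [List.map_cons, List.sum_cons, List.mem_cons]
    have hndt : t.Nodup := (List.nodup_cons.mp hnd).2
    by_cases hc : c = b
    · subst hc
      have hct : c ∉ t := (List.nodup_cons.mp hnd).1
      simp [hct, ih hndt]
    · simp [hc, ih hndt]

-- summing the per-reported-user counts over the distinct reported users equals one count over the pairs
lemma pvSum_bridge (Q : String → Prop) [DecidablePred Q] (m : String) :
    ∀ (l : List (String × String)) (bs : List String), bs.Nodup → (∀ p ∈ l, p.2 ∈ bs) →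
      ((bs.filter (fun b => decide (Q b))).map
          (fun b => (((l.filter (fun p => p.2 == b)).map Prod.fst).count m : Int))).sum
        = (l.countP (fun p => decide (Q p.2) && (p.1 == m)) : Int) := by
  intro l
  induction l with
  | nil =>
    intro bs _ _
    simp
  | cons p t ih =>
    intro bs hnd hmem
    have hterm : ∀ b : String,
        ((((p :: t).filter (fun q => q.2 == b)).map Prod.fst).count m : Int)
          = (((t.filter (fun q => q.2 == b)).map Prod.fst).count m : Int)
            + (if p.2 = b ∧ p.1 = m then 1 else 0) := by
      intro b
      rw [List.filter_cons]
      by_cases hb : p.2 = b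
      · have hbt : (p.2 == b) = true := by simp [hb]
        rw [hbt, if_pos rfl]
        simp only [List.map_cons, List.count_cons]
        by_cases hm : p.1 = m
        · have hmm : (m == p.1) = true := by simp [hm.symm]
          simp only [List.count_cons, hb, hm, and_self, if_true]
          push_cast
          split_ifs with hcc
          · ring
          · simp at hcc
        · have hmm : (m == p.1) = false := by
            simp only [beq_eq_false_iff_ne, ne_eq]
            exact fun h => hm h.symm
          simp [hmm, hb, hm]
      · have hbt : (p.2 == b) = false := by simp [hb]
        simp [hbt, hb]
    rw [List.map_congr_left (fun b _ => hterm b)]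
    have hsplit : ∀ (ws : List String),
        (ws.map (fun b => (((t.filter (fun q => q.2 == b)).map Prod.fst).count m : Int)
            + (if p.2 = b ∧ p.1 = m then (1:Int) else 0))).sum
          = (ws.map (fun b => (((t.filter (fun q => q.2 == b)).map Prod.fst).count m : Int))).sum
            + (ws.map (fun b => if p.2 = b ∧ p.1 = m then (1:Int) else 0)).sum := by
      intro ws
      induction ws with
      | nil => simp
      | cons w ws ihw => simp only [List.map_cons, List.sum_cons, ihw]; ring
    rw [hsplit, ih bs hnd (fun q hq => hmem q (List.mem_cons_of_mem p hq))]
    have hite : ((bs.filter (fun b => decide (Q b))).map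
        (fun b => if p.2 = b ∧ p.1 = m then (1:Int) else 0)).sum
          = if (decide (Q p.2) && (p.1 == m)) then (1:Int) else 0 := by
      by_cases hm : p.1 = m
      · have heach : ∀ b, (if p.2 = b ∧ p.1 = m then (1:Int) else 0) = (if p.2 = b then (1:Int) else 0) := by
          intro b; simp [hm]
        rw [List.map_congr_left (fun b _ => heach b)]
        rw [pvSum_single _ (List.Nodup.filter _ hnd)]
        by_cases hQ : Q p.2
        · have hin : p.2 ∈ bs.filter (fun b => decide (Q b)) :=
            List.mem_filter.mpr ⟨hmem p List.mem_cons_self, by simp [hQ]⟩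
          simp [hin, hQ, hm]
        · have hout : p.2 ∉ bs.filter (fun b => decide (Q b)) := by
            intro hc
            exact hQ (by simpa using (List.mem_filter.mp hc).2)
          simp [hout, hQ]
      · have heach : ∀ b, (if p.2 = b ∧ p.1 = m then (1:Int) else 0) = 0 := by
          intro b; simp [hm]
        rw [List.map_congr_left (fun b _ => heach b)]
        have h0 : (p.1 == m) = false := by
          simp only [beq_eq_false_iff_ne, ne_eq]; exact hm
        simp [h0]
    rw [hite, List.countP_cons]
    push_cast
    by_cases hc : (decide (Q p.2) && (p.1 == m)) = true
    · simp [hc]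
    · simp [hc]

-- B's group scan over a list sorted by reported user counts exactly the pairs whose
-- reported user occurs ≥ k times (as second component) in the whole list
lemma pvCount_groupScan (k : Int) (i : String) :
    ∀ (n : ℕ) (l : List (String × String)), l.length ≤ n →
      l.Pairwise (fun a b => a.2 ≤ b.2) →
      (pvGroupScan k l).count i
        = l.countP (fun p => decide (k ≤ (((l.map Prod.snd).count p.2 : ℕ) : Int)) && (p.1 == i)) := by
  intro n
  induction n with
  | zero =>
    intro l hl _
    have : l = [] := List.eq_nil_of_length_eq_zero (Nat.le_zero.mp hl)
    subst this; simp [pvGroupScan]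
  | succ n ih =>
    intro l hl hpw
    cases l with
    | nil => simp [pvGroupScan]
    | cons p t =>
      set f : String × String → Bool := fun q => q.2 == p.2 with hf
      set T := (p :: t).takeWhile f with hT
      set R := (p :: t).dropWhile f with hR
      have hTR : T ++ R = p :: t := List.takeWhile_append_dropWhile
      -- members of T have second component p.2
      have hTmem : ∀ q ∈ T, q.2 = p.2 := by
        intro q hq
        have := List.mem_takeWhile_imp hq
        simpa [hf] using this
      -- R is a sublist of t (since f p = true)
      have hfp : f p = true := by simp [hf]
      have hRt : R = t.dropWhile f := by
        rw [hR]; simp only [List.dropWhile_cons, hfp]; simp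
      have hRsub : R.Sublist t := hRt ▸ List.dropWhile_sublist f
      -- every member of R has second component ≠ p.2
      have hRmem : ∀ q ∈ R, q.2 ≠ p.2 := by
        cases hRc : R with
        | nil => intro q hq; cases hq
        | cons x R' =>
          have hx : f x = false := by
            have := List.head?_dropWhile_not f (p :: t)
            rw [← hR, hRc] at this
            simpa using this
          have hxne : x.2 ≠ p.2 := by simpa [hf] using hx
          have hxmem : x ∈ t := hRsub.subset (hRc ▸ List.mem_cons_self)
          have hplex : p.2 ≤ x.2 := (List.pairwise_cons.mp hpw).1 x hxmem
          have hplt : p.2 < x.2 := lt_of_le_of_ne hplex (fun h => hxne h.symm)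
          intro q hq
          rcases List.mem_cons.mp hq with h | h
          · subst h; exact hxne
          · have hRpw : R.Pairwise (fun a b => a.2 ≤ b.2) :=
              hpw.sublist (hRsub.cons p)
            have hxq : x.2 ≤ q.2 := by
              rw [hRc] at hRpw
              exact (List.pairwise_cons.mp hRpw).1 q h
            exact fun hc => absurd (hc ▸ hxq) (not_le.mpr hplt)
      -- snd-counts of the whole list seen from T and from R
      have hmapTR : (p :: t).map Prod.snd = T.map Prod.snd ++ R.map Prod.snd := by
        rw [← hTR, List.map_append]
      have hcntT : ((p :: t).map Prod.snd).count p.2 = T.length := by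
        rw [hmapTR, List.count_append]
        have h1 : (T.map Prod.snd).count p.2 = T.length := by
          rw [List.count_eq_length.mpr (fun b hb => by
            rcases List.mem_map.mp hb with ⟨q, hq, hqe⟩
            rw [← hqe, hTmem q hq]), List.length_map]
        have h2 : (R.map Prod.snd).count p.2 = 0 := by
          rw [List.count_eq_zero]
          intro hb
          rcases List.mem_map.mp hb with ⟨q, hq, hqe⟩
          exact hRmem q hq hqe
        rw [h1, h2]
        omega
      have hcntR : ∀ q ∈ R, ((p :: t).map Prod.snd).count q.2 = (R.map Prod.snd).count q.2 := by
        intro q hq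
        rw [hmapTR, List.count_append]
        have h1 : (T.map Prod.snd).count q.2 = 0 := by
          rw [List.count_eq_zero]
          intro hb
          rcases List.mem_map.mp hb with ⟨w, hw, hwe⟩
          exact hRmem q hq (by rw [← hwe, hTmem w hw])
        rw [h1, Nat.zero_add]
      -- unfold one step of the scan
      have hscan : pvGroupScan k (p :: t)
          = (if k ≤ ((T.map Prod.fst).length : Int) then T.map Prod.fst else []) ++ pvGroupScan k R := by
        rw [pvGroupScan]
      -- lengths for the recursion
      have hRlen : R.length ≤ n := by
        have := hRsub.length_le
        have hl' : t.length ≤ n := by simpa using hl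
        omega
      have hRpw : R.Pairwise (fun a b => a.2 ≤ b.2) := hpw.sublist (hRsub.cons p)
      have hIH := ih R hRlen hRpw
      -- countP of the whole splits over T ++ R
      have hsplit : (p :: t).countP
            (fun q => decide (k ≤ ((((p :: t).map Prod.snd).count q.2 : ℕ) : Int)) && (q.1 == i))
          = T.countP (fun q => decide (k ≤ ((((p :: t).map Prod.snd).count q.2 : ℕ) : Int)) && (q.1 == i))
            + R.countP (fun q => decide (k ≤ ((((p :: t).map Prod.snd).count q.2 : ℕ) : Int)) && (q.1 == i)) := by
        rw [← hTR, List.countP_append]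
      have hRpart : R.countP
            (fun q => decide (k ≤ ((((p :: t).map Prod.snd).count q.2 : ℕ) : Int)) && (q.1 == i))
          = R.countP (fun q => decide (k ≤ (((R.map Prod.snd).count q.2 : ℕ) : Int)) && (q.1 == i)) := by
        apply List.countP_congr
        intro q hq
        rw [hcntR q hq]
      have hTpart : T.countP
            (fun q => decide (k ≤ ((((p :: t).map Prod.snd).count q.2 : ℕ) : Int)) && (q.1 == i))
          = if k ≤ (T.length : Int) then (T.map Prod.fst).count i else 0 := by
        rw [List.countP_congr (fun q hq => by rw [hTmem q hq, hcntT])]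
        by_cases hk : k ≤ (T.length : Int)
        · rw [if_pos hk]
          have hc2 : T.countP (fun q => decide (k ≤ (T.length : Int)) && (q.1 == i))
              = T.countP (fun q : String × String => q.1 == i) :=
            List.countP_congr (fun q _ => by simp [hk])
          rw [hc2, List.count_eq_countP, List.countP_map]
          rfl
        · rw [if_neg hk]
          rw [List.countP_eq_zero.mpr (fun q _ => by simp [hk])]
      rw [hscan, List.count_append, hIH, hsplit, hRpart, hTpart]
      by_cases hk : k ≤ (T.length : Int)
      · rw [if_pos (by simpa using hk), if_pos hk]
      · rw [if_neg (by simpa using hk), if_neg hk]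
        simp

-- ===== VERDICT (by name: the statement is the Claim_ definition above) =====
set_option maxHeartbeats 1000000 in
theorem solution_spec : Claim_equal_solution := by
  intro id_list report k _ _
  unfold Spec_solution
  have hA : solution id_list report k
      = id_list.map (fun i =>
          ((pvBL report).keys.foldl (fun m b =>
            if k ≤ ((pvBL report).getD b PySem.Set.empty).len then
              ((pvBL report).getD b PySem.Set.empty).foldl
                (fun m mem => m.insert mem (m.getD mem 0 + 1)) m
            else m) PySem.Dict.empty).getD i 0) := rfl
  have hB : solution_alt id_list report k
      = id_list.map (fun i =>
          (((pvGroupScan k (PySem.List.sorted (pvPairs report) (fun p => p.2) false)).count i : ℕ) : Int)) := rfl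
  rw [hA, hB]
  apply List.map_congr_left
  intro i _
  obtain ⟨hnd, hkeys, hgetD⟩ := pvInv_pv report
  set S := PySem.List.sorted (pvPairs report) (fun p => p.2) false with hS
  have hperm : S.Perm (pvPairs report) := PySem.List.sorted_perm _ _ _
  have hpermsnd : (S.map Prod.snd).Perm ((pvPairs report).map Prod.snd) := hperm.map _
  -- B's entry as a countP over the deduplicated pair set
  have hBent : ((pvGroupScan k S).count i : Int)
      = ((pvPairs report).countP
          (fun p => decide (k ≤ ((((pvPairs report).map Prod.snd).count p.2 : ℕ) : Int)) && (p.1 == i)) : ℕ) := by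
    have hpw : S.Pairwise (fun a b => a.2 ≤ b.2) := PySem.List.sorted_pairwise _ _
    have h1 := pvCount_groupScan k i S.length S le_rfl hpw
    have h2 : S.countP
          (fun p => decide (k ≤ (((S.map Prod.snd).count p.2 : ℕ) : Int)) && (p.1 == i))
        = S.countP
          (fun p => decide (k ≤ ((((pvPairs report).map Prod.snd).count p.2 : ℕ) : Int)) && (p.1 == i)) := by
      apply List.countP_congr
      intro q _
      rw [hpermsnd.count_eq]
    have h3 : S.countP
          (fun p => decide (k ≤ ((((pvPairs report).map Prod.snd).count p.2 : ℕ) : Int)) && (p.1 == i))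
        = (pvPairs report).countP
          (fun p => decide (k ≤ ((((pvPairs report).map Prod.snd).count p.2 : ℕ) : Int)) && (p.1 == i)) :=
      hperm.countP_eq _
    rw [h1, h2, h3]
  rw [hBent]
  -- A's entry as the same countP
  refine Eq.trans (pvGetD_nested_fold (fun b => (pvBL report).getD b PySem.Set.empty)
    (fun b => k ≤ ((pvBL report).getD b PySem.Set.empty).len) (pvBL report).keys
    PySem.Dict.empty i) ?_
  simp only [PySem.Dict.getD_empty, zero_add]
  have hlen : ∀ b : String, ((pvBL report).getD b PySem.Set.empty).len
      = (((pvPairs report).map Prod.snd).count b : Int) := by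
    intro b
    rw [hgetD b, PySem.Set.len_eq, List.length_map, List.count_eq_countP, List.countP_map,
      ← List.countP_eq_length_filter]
    rfl
  have hfilter : (pvBL report).keys.filter
        (fun b => decide (k ≤ ((pvBL report).getD b PySem.Set.empty).len))
      = (pvBL report).keys.filter
        (fun b => decide (k ≤ (((pvPairs report).map Prod.snd).count b : Int))) := by
    apply List.filter_congr
    intro b _
    rw [hlen b]
  have hFcount : ∀ b : String,
      (((pvBL report).getD b PySem.Set.empty).count i : Int)
        = ((((pvPairs report).filter (fun p => p.2 == b)).map Prod.fst).count i : Int) := by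
    intro b; rw [hgetD b]
  rw [hfilter, List.map_congr_left (fun b _ => hFcount b)]
  exact pvSum_bridge (fun b => k ≤ (((pvPairs report).map Prod.snd).count b : Int)) i
    (pvPairs report) (pvBL report).keys (by rw [hkeys]; exact PySem.Set.nodup_ofList _)
    (fun p hp => by rw [hkeys, PySem.Set.mem_ofList]; exact List.mem_map.mpr ⟨p, hp, rfl⟩)
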